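-- pv_equiv track=rewrite | github.com/Baselyne-Systems/retrieval-os | tests/load/test_realistic_workload.py | _make_corpus
-- ===== SOURCE A (Python) =====
-- _QUERY_TOPICS = [
--     "retrieval augmented generation",
--     "vector similarity search",
--     "embedding model selection",
--     "chunk size optimisation",
--     "HNSW graph parameters",
--     "reranking strategies",
--     "hybrid sparse dense search",
--     "production deployment latency",
--     "semantic cache design",
--     "multi-tenant isolation",
--     "evaluation metrics recall",
--     "cosine vs dot product distance",
--     "quantization impact recall",
--     "index freshness update strategy",
--     "context window management",
--     "metadata filter performance",
--     "cold start embedding latency",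
--     "horizontal scaling Qdrant",
--     "Redis cache invalidation",
--     "hallucination reduction RAG",
-- ]
--
-- def _make_corpus(n: int) -> list[str]:
--     """Generate n distinct query strings with realistic variation."""
--     queries = []
--     for i in range(n):
--         topic = _QUERY_TOPICS[i % len(_QUERY_TOPICS)]
--         variant = i // len(_QUERY_TOPICS)
--         if variant == 0:
--             q = f"What is the best approach to {topic} in production?"
--         elif variant == 1:
--             q = f"How does {topic} affect retrieval quality at scale?"
--         elif variant == 2:
--             q = f"Explain the trade-offs of different {topic} configurations."
--         elif variant == 3:
--             q = f"What are the common failure modes in {topic} systems?"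
--         else:
--             q = f"Best practices for {topic} with large document collections? (v{variant})"
--         queries.append(q)
--     return queries
-- ===== SOURCE B (Python) =====
-- _QUERY_TOPICS = [
--     "retrieval augmented generation",
--     "vector similarity search",
--     "embedding model selection",
--     "chunk size optimisation",
--     "HNSW graph parameters",
--     "reranking strategies",
--     "hybrid sparse dense search",
--     "production deployment latency",
--     "semantic cache design",
--     "multi-tenant isolation",
--     "evaluation metrics recall",
--     "cosine vs dot product distance",
--     "quantization impact recall",
--     "index freshness update strategy",
--     "context window management",
--     "metadata filter performance",
--     "cold start embedding latency",
--     "horizontal scaling Qdrant",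
--     "Redis cache invalidation",
--     "hallucination reduction RAG",
-- ]
--
-- _TEMPLATES = [
--     "What is the best approach to {topic} in production?",
--     "How does {topic} affect retrieval quality at scale?",
--     "Explain the trade-offs of different {topic} configurations.",
--     "What are the common failure modes in {topic} systems?",
--     "Best practices for {topic} with large document collections? (v{variant})",
-- ]
--
-- def _make_corpus(n: int) -> list[str]:
--     """Generate n distinct query strings with realistic variation."""
--     if n <= 0:
--         return []
--     full, rem = divmod(n, len(_QUERY_TOPICS))
--     queries = [
--         _TEMPLATES[min(variant, 4)].format(topic=topic, variant=variant)
--         for variant in range(full)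
--         for topic in _QUERY_TOPICS
--     ]
--     queries.extend(
--         _TEMPLATES[min(full, 4)].format(topic=topic, variant=full)
--         for topic in _QUERY_TOPICS[:rem]
--     )
--     return queries
-- ===== Notes on version B (the rewrite author's own statement) =====
-- stated objective: alternative
-- what changed: Replaces the flat index loop with its i % len / i // len arithmetic and if/elif chain by block iteration: full blocks over the topic list per variant (via divmod once) plus a truncated final block, selecting from a template table indexed by min(variant, 4).
import Mathlib
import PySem

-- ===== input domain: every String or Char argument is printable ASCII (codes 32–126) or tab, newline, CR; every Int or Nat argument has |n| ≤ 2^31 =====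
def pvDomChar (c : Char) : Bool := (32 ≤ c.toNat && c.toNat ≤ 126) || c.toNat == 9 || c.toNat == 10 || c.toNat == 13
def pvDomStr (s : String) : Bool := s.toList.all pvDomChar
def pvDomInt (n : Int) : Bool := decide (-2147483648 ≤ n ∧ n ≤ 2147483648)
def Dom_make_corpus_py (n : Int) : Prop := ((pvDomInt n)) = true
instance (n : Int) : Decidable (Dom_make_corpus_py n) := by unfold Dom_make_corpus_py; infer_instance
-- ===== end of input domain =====

-- B replaces A's flat index loop (i % len / i // len plus an if/elif chain) by block iteration:
-- full blocks over the topic list per variant plus a truncated final block, with a template table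
-- indexed by min(variant, 4); same output, different decomposition (objective: alternative).

-- shared module constant _QUERY_TOPICS
def pvTopics : List String := [
  "retrieval augmented generation",
  "vector similarity search",
  "embedding model selection",
  "chunk size optimisation",
  "HNSW graph parameters",
  "reranking strategies",
  "hybrid sparse dense search",
  "production deployment latency",
  "semantic cache design",
  "multi-tenant isolation",
  "evaluation metrics recall",
  "cosine vs dot product distance",
  "quantization impact recall",
  "index freshness update strategy",
  "context window management",
  "metadata filter performance",
  "cold start embedding latency",
  "horizontal scaling Qdrant",
  "Redis cache invalidation",
  "hallucination reduction RAG"]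

-- ===== PORT A =====
-- loop body of A: topic = _QUERY_TOPICS[i % len], variant = i // len, then the if/elif chain.
-- the index i % len is always in range for i ≥ 0, so pyGetD's default is never used.
def pvBuildA (i : Int) : String :=
  let topic := PySem.List.pyGetD pvTopics (PySem.Int.mod i (pvTopics.length : Int)) ""
  let variant := PySem.Int.floordiv i (pvTopics.length : Int)
  if variant = 0 then "What is the best approach to " ++ topic ++ " in production?"
  else if variant = 1 then "How does " ++ topic ++ " affect retrieval quality at scale?"
  else if variant = 2 then "Explain the trade-offs of different " ++ topic ++ " configurations."
  else if variant = 3 then "What are the common failure modes in " ++ topic ++ " systems?"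
  else "Best practices for " ++ topic ++ " with large document collections? (v" ++ PySem.Int.toStr variant ++ ")"

def make_corpus_py (n : Int) : List String :=
  (PySem.List.pyRange 0 n 1).foldl (fun queries i => queries ++ [pvBuildA i]) []

-- ===== PORT B =====
-- _TEMPLATES[min(variant, 4)].format(topic=topic, variant=variant): the indexed template table,
-- ported as a branch on the index that builds the formatted string (exact for these templates).
def pvRender (topic : String) (variant : Int) : String :=
  let idx := min variant 4
  if idx = 0 then "What is the best approach to " ++ topic ++ " in production?"
  else if idx = 1 then "How does " ++ topic ++ " affect retrieval quality at scale?"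
  else if idx = 2 then "Explain the trade-offs of different " ++ topic ++ " configurations."
  else if idx = 3 then "What are the common failure modes in " ++ topic ++ " systems?"
  else "Best practices for " ++ topic ++ " with large document collections? (v" ++ PySem.Int.toStr variant ++ ")"

def make_corpus_py_alt (n : Int) : List String :=
  if n ≤ 0 then []
  else
    let full := PySem.Int.floordiv n (pvTopics.length : Int)
    let rem := PySem.Int.mod n (pvTopics.length : Int)
    ((PySem.List.pyRange 0 full 1).flatMap (fun variant => pvTopics.map (fun topic => pvRender topic variant)))
      ++ (PySem.List.slice pvTopics none (some rem)).map (fun topic => pvRender topic full)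

-- ===== PRECONDITION & SPEC =====
def Spec_make_corpus_py (n : Int) (out : List String) : Prop := out = make_corpus_py_alt n
instance (n : Int) (out : List String) : Decidable (Spec_make_corpus_py n out) := by unfold Spec_make_corpus_py; infer_instance

-- ===== CLAIM (what is proved, stated in full; the proofs are below) =====
def Claim_equal_make_corpus_py : Prop := ∀ (n : Int), Dom_make_corpus_py n → Spec_make_corpus_py n (make_corpus_py n)

-- ===== LEMMAS AND PROOFS =====

lemma pv_div20 (v k : Int) (h0 : 0 ≤ k) (h1 : k < 20) :
    PySem.Int.floordiv (20 * v + k) 20 = v := by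
  rw [PySem.Int.floordiv_eq_iff_of_pos (by omega)]
  omega

lemma pv_mod20 (v k : Int) (h0 : 0 ≤ k) (h1 : k < 20) :
    PySem.Int.mod (20 * v + k) 20 = k := by
  have h := PySem.Int.floordiv_mul_add_mod (20 * v + k) 20
  rw [pv_div20 v k h0 h1] at h
  omega

lemma pv_build_eq_render (v : Int) (hv : 0 ≤ v) (k : Int) (h0 : 0 ≤ k) (h1 : k < 20) :
    pvBuildA (20 * v + k) = pvRender (PySem.List.pyGetD pvTopics k "") v := by
  unfold pvBuildA pvRender
  rw [show ((pvTopics.length : Nat) : Int) = 20 from rfl]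
  rw [pv_div20 v k h0 h1, pv_mod20 v k h0 h1]
  rcases lt_or_ge v 4 with h | h
  · interval_cases v <;> simp
  · have hmin : min v 4 = 4 := by omega
    rw [hmin]
    have : ¬ v = 0 := by omega
    have : ¬ v = 1 := by omega
    have : ¬ v = 2 := by omega
    have : ¬ v = 3 := by omega
    simp_all

lemma pv_block (v : Int) (hv : 0 ≤ v) :
    (PySem.List.pyRange (20 * v) (20 * v + 20) 1).map pvBuildA
      = pvTopics.map (fun t => pvRender t v) := by
  rw [PySem.List.pyRange_one]
  rw [show (20 * v + 20 - 20 * v).toNat = 20 by omega]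
  rw [show List.range 20 = [0,1,2,3,4,5,6,7,8,9,10,11,12,13,14,15,16,17,18,19] from rfl]
  simp only [List.map_cons, List.map_nil, pvTopics,
    List.cons.injEq, and_true]
  refine ⟨?_,?_,?_,?_,?_,?_,?_,?_,?_,?_,?_,?_,?_,?_,?_,?_,?_,?_,?_,?_⟩ <;>
    · push_cast
      first
        | (rw [show (20 * v + 0 : Int) = 20 * v + 0 from rfl]; exact pv_build_eq_render v hv _ (by norm_num) (by norm_num))
        | exact pv_build_eq_render v hv _ (by norm_num) (by norm_num)

lemma pv_blocks (q : Nat) :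
    (PySem.List.pyRange 0 (20 * (q : Int)) 1).map pvBuildA
      = (PySem.List.pyRange 0 (q : Int) 1).flatMap (fun v => pvTopics.map (fun t => pvRender t v)) := by
  induction q with
  | zero => simp [PySem.List.pyRange_one_eq_nil]
  | succ m ih =>
    push_cast
    rw [show (20 * ((m : Int) + 1)) = 20 * (m : Int) + 20 by ring]
    rw [PySem.List.pyRange_one_append 0 (20 * (m : Int)) (20 * (m : Int) + 20) (by positivity) (by omega)]
    rw [PySem.List.pyRange_one_succ_right (by positivity)]
    rw [List.map_append, List.flatMap_append, ih, pv_block (m : Int) (by positivity)]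
    simp

lemma pv_partial_block (v : Int) (hv : 0 ≤ v) (r : Nat) (hr : r ≤ 20) :
    (PySem.List.pyRange (20 * v) (20 * v + (r : Int)) 1).map pvBuildA
      = (pvTopics.take r).map (fun t => pvRender t v) := by
  have hb := pv_block v hv
  rw [PySem.List.pyRange_one_append (20 * v) (20 * v + (r : Int)) (20 * v + 20) (by omega) (by omega),
    List.map_append] at hb
  have hlen : ((PySem.List.pyRange (20 * v) (20 * v + (r : Int)) 1).map pvBuildA).length = r := by
    simp [PySem.List.length_pyRange_one]
  calc (PySem.List.pyRange (20 * v) (20 * v + (r : Int)) 1).map pvBuildA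
      = (((PySem.List.pyRange (20 * v) (20 * v + (r : Int)) 1).map pvBuildA
          ++ (PySem.List.pyRange (20 * v + (r : Int)) (20 * v + 20) 1).map pvBuildA).take r) := by
        rw [List.take_left' hlen]
    _ = (pvTopics.map (fun t => pvRender t v)).take r := by rw [← hb]
    _ = (pvTopics.take r).map (fun t => pvRender t v) := by rw [List.map_take]

-- ===== VERDICT (by name: the statement is the Claim_ definition above) =====
theorem make_corpus_py_spec : Claim_equal_make_corpus_py := by
  intro n _
  unfold Spec_make_corpus_py make_corpus_py make_corpus_py_alt
  rw [PySem.List.foldl_append_singleton_eq_map]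
  by_cases hn : n ≤ 0
  · simp [hn, PySem.List.pyRange_one_eq_nil]
  · simp only [if_neg hn]
    replace hn : 0 < n := by omega
    rw [show ((pvTopics.length : Nat) : Int) = 20 from rfl]
    set q := PySem.Int.floordiv n 20 with hq
    set r := PySem.Int.mod n 20 with hr
    have hqr : q * 20 + r = n := PySem.Int.floordiv_mul_add_mod n 20
    have hr0 : 0 ≤ r := PySem.Int.mod_nonneg n (by omega)
    have hr20 : r < 20 := PySem.Int.mod_lt n (by omega)
    have hq0 : 0 ≤ q := by omega
    rw [PySem.List.pyRange_one_append 0 (20 * q) n (by omega) (by omega), List.map_append]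
    have h1 : (PySem.List.pyRange 0 (20 * q) 1).map pvBuildA
        = (PySem.List.pyRange 0 q 1).flatMap (fun v => pvTopics.map (fun t => pvRender t v)) := by
      have := pv_blocks q.toNat
      rwa [Int.toNat_of_nonneg hq0] at this
    have h2 : (PySem.List.pyRange (20 * q) n 1).map pvBuildA
        = (PySem.List.slice pvTopics none (some r)).map (fun t => pvRender t q) := by
      have := pv_partial_block q hq0 r.toNat (by omega)
      rw [Int.toNat_of_nonneg hr0] at this
      rw [show (20 * q + r) = n by omega] at this
      rw [this, PySem.List.slice_to pvTopics hr0]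
    rw [h1, h2]
    simp
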